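-- pv_equiv track=rewrite | github.com/wjddn3711/coding-practice | 1/20211001_01.py | solution
-- ===== SOURCE A (Python) =====
-- def solution(A,B):
--     answer =0 # 초기 누적합계 0으로 초기화
--     # 두 배열에서 숫자의 곱이 최소가 되는 경우는 한 배열을 기준으로 최소값과 다른 배열의 최대값을 곱하는 경우이다
--     while A: # A를 기준으로 최소값을 골라 그 값을 B의 최대값과 곱하는 경우를 생각해보자
--         minVal = min(A) # A의 최소값
--         maxVal = max(B) # B의 최대값
--         answer += minVal*maxVal #A의 최소값*B의 최대값 (순서는 무관하다)
--         A.remove(minVal) # 마지막에 A와 B를 제거함으로 다시 while(조건)에서 만약 A배열이 비었다면 아래 return수행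
--         B.remove(maxVal)
--     return answer
-- ===== SOURCE B (Python) =====
-- def solution(A, B):
--     # Return-value equivalent to A (A empties its argument lists in place; B does not mutate).
--     return sum(a * b for a, b in zip(sorted(A), sorted(B, reverse=True)))
-- ===== Notes on version B (the rewrite author's own statement) =====
-- stated objective: faster
-- what changed: Replaced the repeated min(A)/max(B) scan-and-remove loop by sorting A ascending and B descending once and summing the pairwise products.
import Mathlib
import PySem

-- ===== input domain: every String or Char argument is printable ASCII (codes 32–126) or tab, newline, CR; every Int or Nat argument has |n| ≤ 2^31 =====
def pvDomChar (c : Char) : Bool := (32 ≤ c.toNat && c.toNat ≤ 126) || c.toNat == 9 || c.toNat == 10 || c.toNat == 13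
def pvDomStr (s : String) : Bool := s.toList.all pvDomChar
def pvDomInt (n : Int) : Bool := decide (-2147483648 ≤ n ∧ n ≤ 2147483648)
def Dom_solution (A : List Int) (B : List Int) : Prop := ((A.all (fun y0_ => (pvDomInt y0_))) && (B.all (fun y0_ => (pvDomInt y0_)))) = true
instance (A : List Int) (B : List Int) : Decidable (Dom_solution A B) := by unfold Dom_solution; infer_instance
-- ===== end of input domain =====

-- B sorts A ascending and B descending once and sums pairwise products
-- instead of A's repeated min/max scan-and-remove loop; equivalence is about
-- the RETURN value only: A empties both argument lists in place, B does not mutate.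


-- ===== PORT A =====
-- while A: minVal = min(A); maxVal = max(B); answer += minVal*maxVal; A.remove(minVal); B.remove(maxVal)
def solution (A : List Int) (B : List Int) : Int :=
  if hA : A = [] then 0
  else
    match hm : PySem.List.min? A (fun x => x) with
    | none => 0  -- unreachable: A ≠ []
    | some mn =>
      match PySem.List.max? B (fun x => x) with
      | none => 0  -- Python raises ValueError here (max of empty B); excluded by Pre_
      | some mx =>
        match hr : PySem.List.remove? A mn with
        | none => 0  -- unreachable: mn ∈ A
        | some A' =>
          match PySem.List.remove? B mx with
          | none => 0  -- unreachable: mx ∈ B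
          | some B' => mn * mx + solution A' B'
  termination_by A.length
  decreasing_by
    have hmem : mn ∈ A := PySem.List.min?_mem hm
    have : PySem.List.remove? A mn = some (A.erase mn) :=
      PySem.List.remove?_eq_some_erase A mn hmem
    have hA' : A' = A.erase mn := by rw [this] at hr; exact (Option.some_inj.mp hr).symm
    subst hA'
    exact A.length_erase_of_mem hmem ▸ Nat.sub_lt (List.length_pos_iff.mpr hA) Nat.one_pos

-- ===== PORT B =====
-- sum(a*b for a,b in zip(sorted(A), sorted(B, reverse=True)))
def solution_alt (A : List Int) (B : List Int) : Int :=
  (((PySem.List.sorted A (fun x => x) false).zip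
      (PySem.List.sorted B (fun x => x) true)).map (fun p => p.1 * p.2)).sum

-- ===== PRECONDITION & SPEC =====
-- Pre_ excludes exactly the inputs where A raises: A longer than B makes max(B) hit an empty list.
def Pre_solution (A : List Int) (B : List Int) : Prop := A.length ≤ B.length
instance (A : List Int) (B : List Int) : Decidable (Pre_solution A B) := by unfold Pre_solution; infer_instance
def pvWitness_solution : List Int × List Int := ([1, 3, 2], [5, 4, 6])

def Spec_solution (A : List Int) (B : List Int) (out : Int) : Prop := out = solution_alt A B
instance (A : List Int) (B : List Int) (out : Int) : Decidable (Spec_solution A B out) := by unfold Spec_solution; infer_instance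

-- ===== CLAIM (what is proved, stated in full; the proofs are below) =====
def Claim_equal_solution : Prop := ∀ (A : List Int) (B : List Int), Dom_solution A B → Pre_solution A B → Spec_solution A B (solution A B)

-- ===== LEMMAS AND PROOFS =====

-- min(xs) / max(xs) depend only on the multiset of xs
theorem min?_id_eq_of_perm {A A' : List Int} (h : A.Perm A') :
    PySem.List.min? A (fun x => x) = PySem.List.min? A' (fun x => x) := by
  rcases hA : PySem.List.min? A (fun x => x) with _ | m
  · rw [PySem.List.min?_eq_none_iff] at hA
    subst hA
    rw [eq_comm, PySem.List.min?_eq_none_iff]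
    exact (List.Perm.nil_eq h).symm
  · rcases hA' : PySem.List.min? A' (fun x => x) with _ | m'
    · rw [PySem.List.min?_eq_none_iff] at hA'
      subst hA'
      rw [List.Perm.eq_nil h, ((PySem.List.min?_eq_none_iff _ _).mpr rfl)] at hA
      exact absurd hA (by simp)
    · have h3 := PySem.List.min?_isMin hA m' (h.mem_iff.mpr (PySem.List.min?_mem hA'))
      have h4 := PySem.List.min?_isMin hA' m (h.mem_iff.mp (PySem.List.min?_mem hA))
      simp only [Option.some.injEq]
      simp only at h3 h4
      omega

theorem max?_id_eq_of_perm {B B' : List Int} (h : B.Perm B') :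
    PySem.List.max? B (fun x => x) = PySem.List.max? B' (fun x => x) := by
  rcases hB : PySem.List.max? B (fun x => x) with _ | m
  · rw [PySem.List.max?_eq_none_iff] at hB
    subst hB
    rw [eq_comm, PySem.List.max?_eq_none_iff]
    exact (List.Perm.nil_eq h).symm
  · rcases hB' : PySem.List.max? B' (fun x => x) with _ | m'
    · rw [PySem.List.max?_eq_none_iff] at hB'
      subst hB'
      rw [List.Perm.eq_nil h, ((PySem.List.max?_eq_none_iff _ _).mpr rfl)] at hB
      exact absurd hB (by simp)
    · have h3 := PySem.List.max?_isMax hB m' (h.mem_iff.mpr (PySem.List.max?_mem hB'))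
      have h4 := PySem.List.max?_isMax hB' m (h.mem_iff.mp (PySem.List.max?_mem hB))
      simp only [Option.some.injEq]
      simp only at h3 h4
      omega

theorem solution_nil (B : List Int) : solution [] B = 0 := by
  rw [solution]; simp

theorem solution_max_none {A B : List Int} (hx : PySem.List.max? B (fun x => x) = none) :
    solution A B = 0 := by
  rw [solution]
  split
  · rfl
  · split
    · rfl
    · rw [hx]

-- unfolding of A's loop in the nonempty case
theorem solution_cons {A B : List Int} (hA : A ≠ []) {mn mx : Int}
    (hm : PySem.List.min? A (fun x => x) = some mn)
    (hx : PySem.List.max? B (fun x => x) = some mx) :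
    solution A B = mn * mx + solution (A.erase mn) (B.erase mx) := by
  have hmemA : mn ∈ A := PySem.List.min?_mem hm
  have hmemB : mx ∈ B := PySem.List.max?_mem hx
  rw [solution]
  rw [dif_neg hA]
  rw [hm, hx]
  split
  · rename_i h; simp at h
  · rename_i mn' h; injection h with h; subst h
    split
    · rename_i h; simp at h
    · rename_i mx' h; injection h with h; subst h
      split
      · rename_i h; rw [PySem.List.remove?_eq_some_erase A mn hmemA] at h; simp at h
      · rename_i A' h; rw [PySem.List.remove?_eq_some_erase A mn hmemA] at h
        injection h with h; subst h
        split
        · rename_i h; rw [PySem.List.remove?_eq_some_erase B mx hmemB] at h; simp at h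
        · rename_i B' h; rw [PySem.List.remove?_eq_some_erase B mx hmemB] at h
          injection h with h; subst h; rfl

-- A's loop depends only on the multisets of A and B
theorem solution_perm : ∀ (n : Nat) (A A' B B' : List Int), A.length = n →
    A.Perm A' → B.Perm B' → solution A B = solution A' B' := by
  intro n
  induction n with
  | zero =>
    intro A A' B B' hn hAA' _
    have hAnil := List.length_eq_zero_iff.mp hn
    subst hAnil
    have hA'nil := (List.Perm.nil_eq hAA').symm
    subst hA'nil
    rw [solution_nil, solution_nil]
  | succ n ih =>
    intro A A' B B' hn hAA' hBB'
    have hA : A ≠ [] := by intro h; subst h; simp at hn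
    have hA' : A' ≠ [] := by
      intro h; subst h; exact hA (List.Perm.eq_nil hAA')
    rcases hm : PySem.List.min? A (fun x => x) with _ | mn
    · rw [PySem.List.min?_eq_none_iff] at hm; exact absurd hm hA
    have hm' : PySem.List.min? A' (fun x => x) = some mn :=
      (min?_id_eq_of_perm hAA').symm.trans hm
    rcases hx : PySem.List.max? B (fun x => x) with _ | mx
    · have hx' : PySem.List.max? B' (fun x => x) = none :=
        (max?_id_eq_of_perm hBB').symm.trans hx
      rw [solution_max_none hx, solution_max_none hx']
    · have hx' : PySem.List.max? B' (fun x => x) = some mx :=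
        (max?_id_eq_of_perm hBB').symm.trans hx
      rw [solution_cons hA hm hx, solution_cons hA' hm' hx']
      congr 1
      exact ih (A.erase mn) (A'.erase mn) (B.erase mx) (B'.erase mx)
        (by
          have := A.length_erase_of_mem (PySem.List.min?_mem hm)
          omega)
        (hAA'.erase mn) (hBB'.erase mx)

-- head of sorted is the min / head of rev-sorted is the max
theorem min?_of_sorted_cons {A : List Int} {a : Int} {s : List Int}
    (h : PySem.List.sorted A (fun x => x) false = a :: s) :
    PySem.List.min? A (fun x => x) = some a := by
  have hmemA : a ∈ A := (PySem.List.mem_sorted _ _ _ _).mp (h ▸ List.mem_cons_self)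
  have hmin : ∀ y ∈ A, a ≤ y := PySem.List.key_head_sorted_le A (fun x => x) h
  rcases hA : PySem.List.min? A (fun x => x) with _ | m
  · rw [PySem.List.min?_eq_none_iff] at hA
    subst hA; simp at hmemA
  · have h1 := PySem.List.min?_mem hA
    have h2 := PySem.List.min?_isMin hA a hmemA
    have h3 := hmin m h1
    simp only at h2
    congr 1
    omega

theorem max?_of_sorted_rev_cons {B : List Int} {b : Int} {t : List Int}
    (h : PySem.List.sorted B (fun x => x) true = b :: t) :
    PySem.List.max? B (fun x => x) = some b := by
  have hmemB : b ∈ B := (PySem.List.mem_sorted _ _ _ _).mp (h ▸ List.mem_cons_self)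
  have hmax : ∀ y ∈ B, y ≤ b := PySem.List.key_head_sorted_rev_ge B (fun x => x) h
  rcases hB : PySem.List.max? B (fun x => x) with _ | m
  · rw [PySem.List.max?_eq_none_iff] at hB
    subst hB; simp at hmemB
  · have h1 := PySem.List.max?_mem hB
    have h2 := PySem.List.max?_isMax hB b hmemB
    have h3 := hmax m h1
    simp only at h2
    congr 1
    omega

theorem main_eq : ∀ (n : Nat) (A B : List Int), A.length = n → A.length ≤ B.length →
    solution A B = solution_alt A B := by
  intro n
  induction n with
  | zero =>
    intro A B hn _
    rw [List.length_eq_zero_iff.mp hn, solution_nil]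
    unfold solution_alt
    rw [(PySem.List.sorted_eq_nil_iff _ _ _).mpr rfl]
    simp
  | succ n ih =>
    intro A B hn hlen
    have hA : A ≠ [] := by intro h; subst h; simp at hn
    have hB : B ≠ [] := List.length_pos_iff.mp (by omega)
    rcases hs : PySem.List.sorted A (fun x => x) false with _ | ⟨a, s'⟩
    · rw [PySem.List.sorted_eq_nil_iff] at hs; exact absurd hs hA
    rcases ht : PySem.List.sorted B (fun x => x) true with _ | ⟨b, t'⟩
    · rw [PySem.List.sorted_eq_nil_iff] at ht; exact absurd ht hB
    have hm := min?_of_sorted_cons hs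
    have hx := max?_of_sorted_rev_cons ht
    -- lengths of the sorted tails
    have hls : s'.length = n := by
      have := PySem.List.length_sorted A (fun x => x) false
      rw [hs] at this; simp at this; omega
    have hlt : t'.length = B.length - 1 := by
      have := PySem.List.length_sorted B (fun x => x) true
      rw [ht] at this; simp at this; omega
    -- erased originals are permutations of the sorted tails
    have hpermA : (A.erase a).Perm s' := by
      have hp : (a :: s').Perm A := hs ▸ PySem.List.sorted_perm A (fun x => x) false
      simpa using (hp.symm).erase a
    have hpermB : (B.erase b).Perm t' := by
      have hp : (b :: t').Perm B := ht ▸ PySem.List.sorted_perm B (fun x => x) true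
      simpa using (hp.symm).erase b
    -- the sorted tails are themselves sorted
    have hsorted_s' : PySem.List.sorted s' (fun x => x) false = s' := by
      apply PySem.List.sorted_eq_self_of_pairwise
      have := PySem.List.sorted_pairwise A (fun x => x)
      rw [hs] at this
      exact this.of_cons
    have hsorted_t' : PySem.List.sorted t' (fun x => x) true = t' := by
      apply PySem.List.sorted_rev_eq_self_of_pairwise
      have := PySem.List.sorted_pairwise_rev B (fun x => x)
      rw [ht] at this
      exact this.of_cons
    rw [solution_cons hA hm hx]
    rw [solution_perm n (A.erase a) s' (B.erase b) t'
          (by rw [hpermA.length_eq]; exact hls) hpermA hpermB]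
    rw [ih s' t' hls (by omega)]
    unfold solution_alt
    rw [hs, ht, hsorted_s', hsorted_t']
    simp [List.zip_cons_cons]

-- ===== VERDICT (by name: the statement is the Claim_ definition above) =====
theorem solution_spec : Claim_equal_solution := by
  intro A B _ hpre
  exact main_eq A.length A B rfl hpre
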